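-- pv_equiv track=rewrite | github.com/rendis/doc-assembly | scripts/docml2json/docml2json.py | _split_table_cells
-- ===== SOURCE A (Python) =====
-- def _split_table_cells(row_text):
--     """Split a table row inner text (between outer pipes) into cell strings.
--     Respects brackets so that | inside [...] is not treated as a delimiter."""
--     cells = []
--     current = []
--     depth = 0
--
--     for ch in row_text:
--         if ch == '[':
--             depth += 1
--             current.append(ch)
--         elif ch == ']':
--             depth = max(0, depth - 1)
--             current.append(ch)
--         elif ch == '|' and depth == 0:
--             cells.append(''.join(current).strip())
--             current = []
--         else:
--             current.append(ch)
--
--     # Last segment after final |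
--     tail = ''.join(current).strip()
--     if tail:
--         cells.append(tail)
--
--     return cells
-- ===== SOURCE B (Python) =====
-- def _split_table_cells(row_text):
--     """Split a table row inner text into cell strings, respecting [...] brackets.
--     Two passes: record top-level '|' positions, then slice the segments out."""
--     cuts = []
--     depth = 0
--     for i, ch in enumerate(row_text):
--         if ch == '[':
--             depth += 1
--         elif ch == ']':
--             depth = max(0, depth - 1)
--         elif ch == '|' and depth == 0:
--             cuts.append(i)
--     cells = []
--     prev = 0
--     for c in cuts:
--         cells.append(row_text[prev:c].strip())
--         prev = c + 1
--     tail = row_text[prev:].strip()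
--     if tail:
--         cells.append(tail)
--     return cells
-- ===== Notes on version B (the rewrite author's own statement) =====
-- stated objective: alternative
-- what changed: Replaces A's single pass that accumulates each cell's characters with a two-pass index scheme: pass 1 records the absolute indices of depth-0 pipe delimiters, pass 2 slices the row between consecutive delimiters and strips each slice (last slice kept only if non-empty).
import Mathlib
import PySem

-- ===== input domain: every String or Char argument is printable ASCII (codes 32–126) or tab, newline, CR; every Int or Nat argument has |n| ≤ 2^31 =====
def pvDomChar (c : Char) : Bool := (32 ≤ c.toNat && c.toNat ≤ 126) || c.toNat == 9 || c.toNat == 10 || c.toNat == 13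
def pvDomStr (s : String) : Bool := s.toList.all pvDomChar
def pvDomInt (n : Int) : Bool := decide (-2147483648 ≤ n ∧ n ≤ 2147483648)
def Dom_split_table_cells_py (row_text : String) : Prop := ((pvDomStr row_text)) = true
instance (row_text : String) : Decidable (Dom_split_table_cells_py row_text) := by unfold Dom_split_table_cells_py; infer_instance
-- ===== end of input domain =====

-- B replaces A's per-character cell accumulator by two passes: record the indices of
-- top-level '|' delimiters, then slice the row between consecutive delimiters (alternative decomposition, same cost).

-- ===== PORT A =====
-- A: one pass, accumulating the current cell's characters and emitting it at each top-level '|'.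
def split_table_cells_py (row_text : String) : List String :=
  let st := row_text.toList.foldl
    (fun (s : List String × List Char × Int) ch =>
      if ch = '[' then (s.1, s.2.1 ++ [ch], s.2.2 + 1)
      else if ch = ']' then (s.1, s.2.1 ++ [ch], max 0 (s.2.2 - 1))
      else if ch = '|' ∧ s.2.2 = 0 then (s.1 ++ [String.ofList (PySem.Chars.strip s.2.1)], [], s.2.2)
      else (s.1, s.2.1 ++ [ch], s.2.2))
    ([], [], 0)
  let tail := PySem.Chars.strip st.2.1
  if tail ≠ [] then st.1 ++ [String.ofList tail] else st.1

-- ===== PORT B =====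
-- B: pass 1 collects the absolute indices of depth-0 '|'; pass 2 slices the row at those indices.
def split_table_cells_py_alt (row_text : String) : List String :=
  let l := row_text.toList
  let cuts := (PySem.List.enumerate l 0).foldl
    (fun (s : List Int × Int) p =>
      if p.2 = '[' then (s.1, s.2 + 1)
      else if p.2 = ']' then (s.1, max 0 (s.2 - 1))
      else if p.2 = '|' ∧ s.2 = 0 then (s.1 ++ [p.1], s.2)
      else s)
    ([], 0)
  let st := cuts.1.foldl
    (fun (s : List String × Int) c =>
      (s.1 ++ [String.ofList (PySem.Chars.strip (PySem.List.slice l (some s.2) (some c)))], c + 1))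
    ([], 0)
  let tail := PySem.Chars.strip (PySem.List.slice l (some st.2) none)
  if tail ≠ [] then st.1 ++ [String.ofList tail] else st.1

-- ===== PRECONDITION & SPEC =====
def Spec_split_table_cells_py (row_text : String) (out : List String) : Prop := out = split_table_cells_py_alt row_text
instance (row_text : String) (out : List String) : Decidable (Spec_split_table_cells_py row_text out) := by unfold Spec_split_table_cells_py; infer_instance

-- ===== CLAIM (what is proved, stated in full; the proofs are below) =====
def Claim_equal_split_table_cells_py : Prop := ∀ (row_text : String), Dom_split_table_cells_py row_text → Spec_split_table_cells_py row_text (split_table_cells_py row_text)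

-- ===== LEMMAS AND PROOFS =====

def pvSegs : List Char → Int → List (List Char) × List Char
  | [], _ => ([], [])
  | ch :: rest, d =>
    if ch = '[' then pvPre ch (pvSegs rest (d + 1))
    else if ch = ']' then pvPre ch (pvSegs rest (max 0 (d - 1)))
    else if ch = '|' ∧ d = 0 then let p := pvSegs rest d; ([] :: p.1, p.2)
    else pvPre ch (pvSegs rest d)
where
  pvPre (c : Char) : List (List Char) × List Char → List (List Char) × List Char
  | ([], last) => ([], c :: last)
  | (s :: t, last) => ((c :: s) :: t, last)

def pvFront (cur : List Char) : List (List Char) × List Char → List (List Char) × List Char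
  | ([], last) => ([], cur ++ last)
  | (s :: t, last) => ((cur ++ s) :: t, last)

theorem pvFront_nil (p : List (List Char) × List Char) : pvFront [] p = p := by
  cases p with | mk a b => cases a <;> simp [pvFront]

theorem pvFront_pre (cur : List Char) (c : Char) (p : List (List Char) × List Char) :
    pvFront cur (pvSegs.pvPre c p) = pvFront (cur ++ [c]) p := by
  cases p with | mk a b => cases a <;> simp [pvFront, pvSegs.pvPre]

def pvCuts : List Char → Nat → Int → List Int
  | [], _, _ => []
  | ch :: rest, i, d =>
    if ch = '[' then pvCuts rest (i + 1) (d + 1)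
    else if ch = ']' then pvCuts rest (i + 1) (max 0 (d - 1))
    else if ch = '|' ∧ d = 0 then (i : Int) :: pvCuts rest (i + 1) d
    else pvCuts rest (i + 1) d

theorem pvTake_snoc (L : List Char) (prev i : Nat) (ch : Char) (rest : List Char)
    (hle : prev ≤ i) (hL : L.drop i = ch :: rest) :
    (L.drop prev).take (i + 1 - prev) = (L.drop prev).take (i - prev) ++ [ch] := by
  have hd : (L.drop prev).drop (i - prev) = ch :: rest := by
    rw [List.drop_drop]
    have hpi : prev + (i - prev) = i := by omega
    rw [hpi, hL]
  have h1 : i + 1 - prev = (i - prev) + 1 := by omega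
  rw [h1, List.take_add, hd]
  simp

theorem pvB_cuts (l : List Char) : ∀ (i : Nat) (d : Int) (acc : List Int),
    ((PySem.List.enumerate l (i : Int)).foldl
      (fun (s : List Int × Int) p =>
        if p.2 = '[' then (s.1, s.2 + 1)
        else if p.2 = ']' then (s.1, max 0 (s.2 - 1))
        else if p.2 = '|' ∧ s.2 = 0 then (s.1 ++ [p.1], s.2)
        else s)
      (acc, d)).1 = acc ++ pvCuts l i d := by
  induction l with
  | nil => intro i d acc; simp [PySem.List.enumerate, pvCuts]
  | cons ch rest ih =>
    intro i d acc
    rw [PySem.List.enumerate_cons]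
    have hc : (i : Int) + 1 = ((i + 1 : Nat) : Int) := by push_cast; ring
    simp only [List.foldl_cons]
    by_cases h1 : ch = '['
    · subst h1; rw [hc] at *; simpa [pvCuts] using ih (i + 1) (d + 1) acc
    · by_cases h2 : ch = ']'
      · subst h2; rw [hc] at *; simpa [pvCuts, h1] using ih (i + 1) (max 0 (d - 1)) acc
      · by_cases h3 : ch = '|' ∧ d = 0
        · obtain ⟨h3a, h3b⟩ := h3
          subst h3a h3b
          rw [hc] at *
          simpa [pvCuts] using ih (i + 1) 0 (acc ++ [(i : Int)])
        · rw [hc] at *; simpa [pvCuts, h1, h2, h3] using ih (i + 1) d acc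

theorem pvB_slices (L : List Char) (l : List Char) :
    ∀ (i prev : Nat) (d : Int) (cells : List String),
    prev ≤ i → L.drop i = l →
    ∃ q : Nat,
      ((pvCuts l i d).foldl
        (fun (s : List String × Int) c =>
          (s.1 ++ [String.ofList (PySem.Chars.strip (PySem.List.slice L (some s.2) (some c)))], c + 1))
        (cells, (prev : Int)))
        = (cells ++ ((pvFront ((L.drop prev).take (i - prev)) (pvSegs l d)).1).map
            (fun s => String.ofList (PySem.Chars.strip s)), (q : Int))
      ∧ L.drop q = (pvFront ((L.drop prev).take (i - prev)) (pvSegs l d)).2 := by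
  induction l with
  | nil =>
    intro i prev d cells hle hL
    refine ⟨prev, ?_, ?_⟩
    · simp [pvCuts, pvSegs, pvFront]
    · have hlen : L.length ≤ i := by
        by_contra h
        have hg := List.drop_eq_getElem_cons (l := L) (by omega : i < L.length)
        rw [hL] at hg; exact (List.cons_ne_nil _ _) hg.symm
      have : (L.drop prev).length ≤ i - prev := by simp; omega
      simp [pvSegs, pvFront, List.take_of_length_le this]
  | cons ch rest ih =>
    intro i prev d cells hle hL
    have hL' : L.drop (i + 1) = rest := by
      have h := congrArg (List.drop 1) hL
      rw [List.drop_drop] at h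
      simpa [Nat.add_comm] using h
    have hsnoc := pvTake_snoc L prev i ch rest hle hL
    by_cases h1 : ch = '['
    · subst h1
      obtain ⟨q, hq1, hq2⟩ := ih (i + 1) prev (d + 1) cells (by omega) hL'
      rw [hsnoc] at hq1 hq2
      exact ⟨q, by simpa [pvCuts, pvSegs, pvFront_pre] using hq1,
                by simpa [pvSegs, pvFront_pre] using hq2⟩
    · by_cases h2 : ch = ']'
      · subst h2
        obtain ⟨q, hq1, hq2⟩ := ih (i + 1) prev (max 0 (d - 1)) cells (by omega) hL'
        rw [hsnoc] at hq1 hq2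
        exact ⟨q, by simpa [pvCuts, pvSegs, pvFront_pre] using hq1,
                  by simpa [pvSegs, pvFront_pre] using hq2⟩
      · by_cases h3 : ch = '|' ∧ d = 0
        · obtain ⟨h3a, h3b⟩ := h3
          subst h3a h3b
          obtain ⟨q, hq1, hq2⟩ :=
            ih (i + 1) (i + 1) 0 (cells ++ [String.ofList (PySem.Chars.strip ((L.drop prev).take (i - prev)))]) (le_refl _) hL'
          simp only [Nat.sub_self, List.take_zero, pvFront_nil] at hq1 hq2
          refine ⟨q, ?_, ?_⟩
          · simp only [pvCuts, pvSegs, Char.reduceEq, reduceIte, and_self, ite_true]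
            rw [List.foldl_cons]
            have hslice : PySem.List.slice L (some ((prev : Nat) : Int)) (some ((i : Nat) : Int))
                = (L.drop prev).take (i - prev) := PySem.List.slice_natCast L prev i
            have hcast : (i : Int) + 1 = ((i + 1 : Nat) : Int) := by push_cast; ring
            rw [hslice, hcast, hq1]
            simp [pvFront]
          · simpa [pvSegs, pvFront] using hq2
        · obtain ⟨q, hq1, hq2⟩ := ih (i + 1) prev d cells (by omega) hL'
          rw [hsnoc] at hq1 hq2
          exact ⟨q, by simpa [pvCuts, pvSegs, h1, h2, h3, pvFront_pre] using hq1,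
                    by simpa [pvSegs, h1, h2, h3, pvFront_pre] using hq2⟩

theorem pvA_fold (l : List Char) : ∀ (d : Int) (cells : List String) (cur : List Char),
    (l.foldl
      (fun (s : List String × List Char × Int) ch =>
        if ch = '[' then (s.1, s.2.1 ++ [ch], s.2.2 + 1)
        else if ch = ']' then (s.1, s.2.1 ++ [ch], max 0 (s.2.2 - 1))
        else if ch = '|' ∧ s.2.2 = 0 then (s.1 ++ [String.ofList (PySem.Chars.strip s.2.1)], [], s.2.2)
        else (s.1, s.2.1 ++ [ch], s.2.2))
      (cells, cur, d)).1
      = cells ++ ((pvFront cur (pvSegs l d)).1).map (fun s => String.ofList (PySem.Chars.strip s))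
    ∧ (l.foldl
      (fun (s : List String × List Char × Int) ch =>
        if ch = '[' then (s.1, s.2.1 ++ [ch], s.2.2 + 1)
        else if ch = ']' then (s.1, s.2.1 ++ [ch], max 0 (s.2.2 - 1))
        else if ch = '|' ∧ s.2.2 = 0 then (s.1 ++ [String.ofList (PySem.Chars.strip s.2.1)], [], s.2.2)
        else (s.1, s.2.1 ++ [ch], s.2.2))
      (cells, cur, d)).2.1
      = (pvFront cur (pvSegs l d)).2 := by
  induction l with
  | nil => intro d cells cur; simp [pvSegs, pvFront]
  | cons ch rest ih =>
    intro d cells cur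
    simp only [List.foldl_cons]
    by_cases h1 : ch = '['
    · subst h1
      simpa [pvSegs, pvFront_pre] using ih (d + 1) cells (cur ++ ['['])
    · by_cases h2 : ch = ']'
      · subst h2
        simpa [pvSegs, pvFront_pre, h1] using ih (max 0 (d - 1)) cells (cur ++ [']'])
      · by_cases h3 : ch = '|' ∧ d = 0
        · obtain ⟨h3a, h3b⟩ := h3
          subst h3a h3b
          have h := ih 0 (cells ++ [String.ofList (PySem.Chars.strip cur)]) []
          rw [pvFront_nil] at h
          simpa [pvSegs, pvFront] using h
        · simpa [pvSegs, h1, h2, h3, pvFront_pre] using ih d cells (cur ++ [ch])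

-- ===== VERDICT (by name: the statement is the Claim_ definition above) =====
theorem split_table_cells_py_spec : Claim_equal_split_table_cells_py := by
  intro row_text _
  unfold Spec_split_table_cells_py split_table_cells_py split_table_cells_py_alt
  obtain ⟨hA1, hA2⟩ := pvA_fold row_text.toList 0 [] []
  rw [pvFront_nil] at hA1 hA2
  have hcuts := pvB_cuts row_text.toList 0 0 []
  obtain ⟨q, hq1, hq2⟩ := pvB_slices row_text.toList row_text.toList 0 0 0 [] (le_refl 0) (by simp)
  simp only [Nat.sub_self, List.take_zero, pvFront_nil, Nat.cast_zero, List.nil_append] at hq1 hq2 hcuts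
  simp only [hA1, hA2, hcuts, hq1, List.nil_append]
  rw [PySem.List.slice_from_natCast, hq2]
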